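-- pv_equiv track=rewrite | github.com/paulprishol/Python | DS_Bootcamp/DS_Bootcamp.Day01/ex05/all_stocks.py | check_commas
-- ===== SOURCE A (Python) =====
-- def check_commas(data):
--     is_comma = i = 0
--     res = True
--     while res and i < len(data):
--         if data[i] == ',':
--             is_comma += 1
--         elif data[i] != " ":
--             is_comma = 0
--         if is_comma > 1:
--             res = False
--         i += 1
--     return res
-- ===== SOURCE B (Python) =====
-- def check_commas(data):
--     s = [c for c in data if c != ' ']
--     return all(a != ',' or b != ',' for a, b in zip(s, s[1:]))
-- ===== Notes on version B (the rewrite author's own statement) =====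
-- stated objective: simpler
-- what changed: Replaces the stateful counter/flag while-loop with a two-step pipeline: drop spaces, then check that no two remaining adjacent characters are both commas.
import Mathlib
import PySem

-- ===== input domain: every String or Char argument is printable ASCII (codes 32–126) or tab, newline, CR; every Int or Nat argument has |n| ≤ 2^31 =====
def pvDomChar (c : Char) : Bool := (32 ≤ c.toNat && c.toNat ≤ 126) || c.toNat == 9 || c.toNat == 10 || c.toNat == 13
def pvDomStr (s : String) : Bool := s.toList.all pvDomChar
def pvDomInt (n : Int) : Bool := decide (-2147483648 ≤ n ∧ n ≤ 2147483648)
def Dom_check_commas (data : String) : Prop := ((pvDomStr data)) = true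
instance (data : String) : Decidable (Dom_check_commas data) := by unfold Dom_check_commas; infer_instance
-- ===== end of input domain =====

-- B replaces A's stateful counter while-loop by: drop spaces, then check no two adjacent chars are both commas (objective: simpler).
-- ===== PORT A =====
def checkLoop : List Char → Int → Bool
  | [], _ => true
  | c :: rest, is_comma =>
    let is_comma := if c = ',' then is_comma + 1 else if c ≠ ' ' then (0 : Int) else is_comma
    if is_comma > 1 then false else checkLoop rest is_comma

def check_commas (data : String) : Bool := checkLoop data.toList 0

-- ===== PORT B =====
def check_commas_alt (data : String) : Bool :=
  let s := data.toList.filter (fun c => c ≠ ' ')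
  (s.zip (s.tail)).all (fun p => !(p.1 = ',') || !(p.2 = ','))

-- ===== PRECONDITION & SPEC =====
def Spec_check_commas (data : String) (out : Bool) : Prop := out = check_commas_alt data
instance (data : String) (out : Bool) : Decidable (Spec_check_commas data out) := by unfold Spec_check_commas; infer_instance

-- ===== CLAIM (what is proved, stated in full; the proofs are below) =====
def Claim_equal_check_commas : Prop := ∀ (data : String), Dom_check_commas data → Spec_check_commas data (check_commas data)

-- ===== LEMMAS AND PROOFS =====

-- adjacent-pair predicate of B, on a plain char list
def pairsOK (l : List Char) : Bool :=
  (l.zip l.tail).all (fun p => !(p.1 = ',') || !(p.2 = ','))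

def headComma : List Char → Bool
  | [] => false
  | c :: _ => c = ','

theorem pairsOK_cons (c : Char) (rest : List Char) :
    pairsOK (c :: rest) = (!(decide (c = ',') && headComma rest) && pairsOK rest) := by
  cases rest with
  | nil => simp [pairsOK, headComma]
  | cons d r2 =>
    by_cases h1 : c = ',' <;> by_cases h2 : d = ',' <;>
      simp [pairsOK, headComma, h1, h2]

-- step 1: characterise the loop on space-free lists
theorem checkLoop_spacefree (l : List Char) (h : ∀ c ∈ l, c ≠ ' ') :
    checkLoop l 0 = pairsOK l ∧ checkLoop l 1 = (!headComma l && pairsOK l) := by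
  induction l with
  | nil => simp [checkLoop, pairsOK, headComma]
  | cons c rest ih =>
    have hc : c ≠ ' ' := h c (List.mem_cons_self ..)
    have ih' := ih (fun x hx => h x (List.mem_cons_of_mem _ hx))
    rw [pairsOK_cons]
    by_cases hcomma : c = ','
    · constructor
      · simp [checkLoop, hcomma, ih'.2, headComma]
      · simp [checkLoop, hcomma, headComma]
    · constructor
      · simp [checkLoop, hcomma, hc, ih'.1, headComma]
      · simp [checkLoop, hcomma, hc, ih'.1, headComma]

-- step 2: the loop ignores spaces while the counter is 0 or 1
theorem checkLoop_filter (l : List Char) (k : Int) (hk : k = 0 ∨ k = 1) :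
    checkLoop l k = checkLoop (l.filter (fun c => c ≠ ' ')) k := by
  induction l generalizing k with
  | nil => simp
  | cons c rest ih =>
    by_cases hsp : c = ' '
    · have : ¬ (c = ',') := by simp [hsp]
      have hk1 : ¬ (k > 1) := by rcases hk with h | h <;> simp [h]
      simp [checkLoop, hsp, hk1, ih k hk]
    · by_cases hcomma : c = ','
      · rcases hk with h | h
        · simp [checkLoop, hcomma, h]
          simpa using ih 1 (Or.inr rfl)
        · simp [checkLoop, hcomma, h]
      · simp [checkLoop, hsp, hcomma, ih 0 (Or.inl rfl)]

-- ===== VERDICT (by name: the statement is the Claim_ definition above) =====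
theorem check_commas_spec : Claim_equal_check_commas := by
  intro data _
  unfold Spec_check_commas check_commas check_commas_alt
  rw [checkLoop_filter _ 0 (Or.inl rfl)]
  exact (checkLoop_spacefree _ (by intro c hc; simpa using (List.mem_filter.mp hc).2)).1
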